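-- pv_equiv track=rewrite | github.com/JELLO-Kim/Al | programmers/zip.py | origin_solution
-- ===== SOURCE A (Python) =====
-- def origin_solution(n, control):
--     for row in control:
--         if row == "w":
--             n+=1
--         elif row == "s":
--             n -=1
--         elif row == "d":
--             n += 10
--         else:
--             n -= 10
--     return n
-- ===== SOURCE B (Python) =====
-- def origin_solution(n, control):
--     w = control.count("w")
--     s = control.count("s")
--     d = control.count("d")
--     return n + w - s + 10 * d - 10 * (len(control) - w - s - d)
-- ===== Notes on version B (the rewrite author's own statement) =====
-- stated objective: simpler
-- what changed: Replaced the per-element 4-way branch loop by three list.count calls and one closed-form arithmetic expression (the 'other' bucket derived as len - w - s - d).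
import Mathlib
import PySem

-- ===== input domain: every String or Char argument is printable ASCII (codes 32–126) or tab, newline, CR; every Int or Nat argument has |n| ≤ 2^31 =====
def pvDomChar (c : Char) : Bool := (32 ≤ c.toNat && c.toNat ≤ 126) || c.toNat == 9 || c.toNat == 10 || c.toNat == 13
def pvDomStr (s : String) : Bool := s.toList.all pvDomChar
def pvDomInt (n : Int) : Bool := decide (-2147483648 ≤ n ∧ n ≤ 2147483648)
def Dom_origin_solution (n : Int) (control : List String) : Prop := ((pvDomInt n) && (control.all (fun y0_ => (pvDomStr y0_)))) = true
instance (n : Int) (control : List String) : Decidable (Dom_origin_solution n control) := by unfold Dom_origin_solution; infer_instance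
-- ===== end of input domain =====

-- B replaces the per-element 4-way branch loop with counts and one closed-form expression (simpler).
-- ===== PORT A =====
def origin_solution (n : Int) (control : List String) : Int :=
  control.foldl (fun n row =>
    if row = "w" then n + 1
    else if row = "s" then n - 1
    else if row = "d" then n + 10
    else n - 10) n

-- ===== PORT B =====
def origin_solution_alt (n : Int) (control : List String) : Int :=
  let w : Int := control.count "w"
  let s : Int := control.count "s"
  let d : Int := control.count "d"
  n + w - s + 10 * d - 10 * ((control.length : Int) - w - s - d)

-- ===== PRECONDITION & SPEC =====
def Spec_origin_solution (n : Int) (control : List String) (out : Int) : Prop := out = origin_solution_alt n control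
instance (n : Int) (control : List String) (out : Int) : Decidable (Spec_origin_solution n control out) := by unfold Spec_origin_solution; infer_instance

-- ===== CLAIM (what is proved, stated in full; the proofs are below) =====
def Claim_equal_origin_solution : Prop := ∀ (n : Int) (control : List String), Dom_origin_solution n control → Spec_origin_solution n control (origin_solution n control)

-- ===== LEMMAS AND PROOFS =====

-- ===== VERDICT (by name: the statement is the Claim_ definition above) =====
theorem origin_solution_key (control : List String) : ∀ n : Int,
    origin_solution n control = origin_solution_alt n control := by
  induction control with
  | nil => intro n; simp [origin_solution, origin_solution_alt]
  | cons a l ih =>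
    intro n
    have h : origin_solution n (a :: l) =
        origin_solution (if a = "w" then n + 1 else if a = "s" then n - 1
          else if a = "d" then n + 10 else n - 10) l := rfl
    rw [h, ih]
    simp only [origin_solution_alt, List.count_cons, List.length_cons]
    by_cases h1 : a = "w" <;> by_cases h2 : a = "s" <;> by_cases h3 : a = "d" <;>
      simp_all <;> push_cast <;> ring

theorem origin_solution_spec : Claim_equal_origin_solution := by
  intro n control _
  unfold Spec_origin_solution
  exact origin_solution_key control n
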